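-- pv_equiv track=rewrite | github.com/5-per-week-Algorithm/algorithm-study | chanwoo/프로그래머스-[3차] 파일명 정렬-lv2.py | parse
-- ===== SOURCE A (Python) =====
-- import string
--
-- def parse(s):
--
--     head = ""
--     num = ""
--     tail = ""
--     digit = list(string.digits)
--     for i,c in enumerate(s):
--         if c in digit:
--             if head == "":
--                 head = s[:i]
--             if len(num) < 5:
--                 num += c
--             else:
--                 tail = s[i:]
--                 break
--         else:
--             if not num == "":
--                 tail = s[i:]
--                 break
--     return [head,num,tail]
-- ===== SOURCE B (Python) =====
-- import string
--
-- def parse(s):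
--     # index of the first digit; -1 if none
--     i = next((k for k, c in enumerate(s) if c.isdigit()), -1)
--     if i < 0:
--         return ["", "", ""]
--     rest = s[i:]
--     run = len(rest) - len(rest.lstrip(string.digits))  # length of the leading digit run
--     num = rest[:min(run, 5)]
--     return [s[:i], num, rest[len(num):]]
-- ===== Notes on version B (the rewrite author's own statement) =====
-- stated objective: simpler
-- what changed: B replaces A's character-by-character state machine (head/num/tail accumulators with an early break) by a direct split: find the index of the first digit, slice the head, measure the leading digit run with lstrip, cap the number at 5 digits; the tail is a slice.
-- intended difference: On strings whose first two characters are both digits, A returns the first digit character as the head component (its head-emptiness re-test fires again on the second digit, e.g. parse of the string 12 gives head 1), while B returns an empty head, the intended value since head is everything before the first digit. — e.g. on parse("12"): A returns ["1", "12", ""], B returns ["", "12", ""]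
import Mathlib
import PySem

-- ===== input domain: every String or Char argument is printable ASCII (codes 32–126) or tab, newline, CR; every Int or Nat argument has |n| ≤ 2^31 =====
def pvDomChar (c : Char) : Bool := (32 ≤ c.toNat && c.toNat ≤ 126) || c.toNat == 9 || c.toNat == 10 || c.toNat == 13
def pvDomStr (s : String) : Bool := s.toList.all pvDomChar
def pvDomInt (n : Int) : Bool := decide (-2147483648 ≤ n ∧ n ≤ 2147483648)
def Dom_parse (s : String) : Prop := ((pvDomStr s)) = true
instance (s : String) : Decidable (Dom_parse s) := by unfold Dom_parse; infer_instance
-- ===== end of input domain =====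

-- B splits the string by position of the first digit (slice + leading-digit-run length)
-- instead of A's character-by-character state machine; objective: simpler.

-- ===== PORT A =====
-- A's for-loop with early break, over the char list with running index i;
-- head/num/tail are the loop state; s[:i] = take i, s[i:] = drop i (i is a nonneg in-range index).
def parseGoA (cs : List Char) (i : Nat) (rem : List Char)
    (head num tail : List Char) : List Char × List Char × List Char :=
  match rem with
  | [] => (head, num, tail)
  | c :: rest =>
    if ("0123456789".toList).contains c then
      let head' := if head = [] then cs.take i else head
      if num.length < 5 then
        parseGoA cs (i + 1) rest head' (num ++ [c]) tail
      else
        (head', num, cs.drop i)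
    else
      if ¬ num = [] then (head, num, cs.drop i)
      else parseGoA cs (i + 1) rest head num tail

def parse (s : String) : List String :=
  let cs := s.toList
  let (h, n, t) := parseGoA cs 0 cs [] [] []
  [String.ofList h, String.ofList n, String.ofList t]

-- ===== PORT B =====
-- Source B: first-digit index = length of the non-digit prefix; leading digit run; slices.
def parse_alt (s : String) : List String :=
  let cs := s.toList
  let head := cs.takeWhile (fun c => !c.isDigit)   -- chars before the first digit
  if head.length = cs.length then ["", "", ""]     -- no digit anywhere
  else
    let rest := cs.drop head.length
    let run := (rest.takeWhile Char.isDigit).length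
    let num := rest.take (min run 5)
    [String.ofList head, String.ofList num, String.ofList (rest.drop num.length)]

-- ===== PRECONDITION & SPEC =====
-- On strings whose first two characters are both digits, A's head-emptiness re-test fires again
-- on the second digit and A returns the first digit character as the head component
-- (parse "12" = ["1","12",""]); B returns the intended empty head ["","12",""].
def D_parse (s : String) : Prop :=
  2 ≤ s.toList.length ∧ (s.toList.take 2).all Char.isDigit = true
instance (s : String) : Decidable (D_parse s) := by unfold D_parse; infer_instance
def Spec_parse (s : String) (out : List String) : Prop := ¬ D_parse s → out = parse_alt s
instance (s : String) (out : List String) : Decidable (Spec_parse s out) := by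
  unfold Spec_parse; infer_instance
def pvDiffWitness_parse : String := "12"
def pvDiffWitnessOut_parse : (List String) × (List String) := (["1", "12", ""], ["", "12", ""])

-- ===== CLAIM (what is proved, stated in full; the proofs are below) =====
def Claim_unchanged_parse : Prop := ∀ (s : String), Dom_parse s → Spec_parse s (parse s)
def Claim_changed_parse : Prop :=
  Dom_parse (pvDiffWitness_parse) ∧ D_parse (pvDiffWitness_parse) ∧
  parse (pvDiffWitness_parse) = pvDiffWitnessOut_parse.1 ∧
  parse_alt (pvDiffWitness_parse) = pvDiffWitnessOut_parse.2 ∧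
  pvDiffWitnessOut_parse.1 ≠ pvDiffWitnessOut_parse.2
def Claim_exact_parse : Prop :=
  ∀ (s : String), Dom_parse s → D_parse s → parse s ≠ parse_alt s

-- ===== LEMMAS AND PROOFS =====

theorem contains_digits_eq_isDigit (c : Char) :
    ("0123456789".toList).contains c = c.isDigit := by
  have hiff : c.isDigit = true ↔ 48 ≤ c.toNat ∧ c.toNat ≤ 57 := by
    simp [Char.isDigit, UInt32.le_iff_toNat_le]
  by_cases h : 48 ≤ c.toNat ∧ c.toNat ≤ 57
  · have h1 : c.isDigit = true := hiff.mpr h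
    have h2 : ("0123456789".toList).contains c = true := by
      have hc := (Char.ofNat_toNat c).symm
      obtain ⟨ha, hb⟩ := h
      interval_cases hv : c.toNat <;> (rw [hc]; decide)
    rw [h1, h2]
  · have h1 : c.isDigit = false := by
      cases hid : c.isDigit
      · rfl
      · exact absurd (hiff.mp hid) h
    have h2 : ("0123456789".toList).contains c = false := by
      cases hct : ("0123456789".toList).contains c
      · rfl
      · exfalso
        have hm : c ∈ "0123456789".toList := by simpa [List.contains_eq_mem] using hct
        apply h
        have hlit : "0123456789".toList = ['0','1','2','3','4','5','6','7','8','9'] := rfl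
        rw [hlit] at hm
        simp only [List.mem_cons, List.not_mem_nil, or_false] at hm
        rcases hm with rfl|rfl|rfl|rfl|rfl|rfl|rfl|rfl|rfl|rfl <;> decide
    rw [h1, h2]

-- Phase 2: once head is nonempty and at least one digit has been read, the loop
-- appends digits up to capacity 5 and the tail is the remainder from the break point.
theorem parseGoA_run (cs : List Char) :
    ∀ (rem : List Char) (i : Nat) (h n : List Char),
    h ≠ [] → n ≠ [] → n.length ≤ 5 → cs.drop i = rem →
    parseGoA cs i rem h n [] =
      (h, n ++ (rem.takeWhile Char.isDigit).take (5 - n.length),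
       rem.drop (min (rem.takeWhile Char.isDigit).length (5 - n.length))) := by
  intro rem
  induction rem with
  | nil => intro i h n hh hn hlen hdrop; simp [parseGoA]
  | cons c rest ih =>
    intro i h n hh hn hlen hdrop
    by_cases hc : c.isDigit
    · rw [parseGoA]
      simp only [contains_digits_eq_isDigit, hc, if_pos, if_true]
      have hh' : (if h = [] then cs.take i else h) = h := by simp [hh]
      by_cases hl : n.length < 5
      · rw [if_pos hl, hh']
        have hdrop' : cs.drop (i + 1) = rest := by
          have := congrArg (List.drop 1) hdrop
          simpa [List.drop_drop, Nat.add_comm] using this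
        rw [ih (i + 1) h (n ++ [c]) hh (by simp) (by simp; omega) hdrop']
        simp only [List.takeWhile_cons, hc, if_true, Prod.mk.injEq, true_and,
          List.length_append, List.length_cons, List.length_nil]
        refine ⟨?_, ?_⟩
        · rw [List.take_cons (by omega)]
          simp [Nat.sub_sub, List.append_assoc]
        · have hmin : min ((rest.takeWhile Char.isDigit).length + 1) (5 - n.length)
              = min (rest.takeWhile Char.isDigit).length (5 - (n.length + 0 + 1)) + 1 := by omega
          rw [hmin, List.drop_succ_cons]
      · rw [if_neg hl, hh', hdrop]
        have h5 : n.length = 5 := by omega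
        simp [h5]
    · rw [parseGoA]
      simp only [contains_digits_eq_isDigit, hc]
      rw [if_neg (by simp [hc]), if_pos (by simpa using hn), hdrop]
      simp [List.takeWhile_cons, hc]

-- Phase 1: the loop skips the non-digit prefix without touching any state.
theorem parseGoA_skip (cs : List Char) :
    ∀ (p : List Char) (i : Nat) (rem : List Char),
    (∀ c ∈ p, ¬ c.isDigit) →
    parseGoA cs i (p ++ rem) [] [] [] = parseGoA cs (i + p.length) rem [] [] [] := by
  intro p
  induction p with
  | nil => intro i rem _; simp
  | cons c pr ih =>
    intro i rem hall
    have hc : ¬ c.isDigit := hall c (by simp)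
    rw [List.cons_append, parseGoA]
    simp only [contains_digits_eq_isDigit, hc]
    rw [if_neg (by simp [hc]), if_neg (by simp)]
    rw [ih (i + 1) rem (fun d hd => hall d (by simp [hd]))]
    congr 1
    simp only [List.length_cons]
    omega

theorem takeWhile_all_not_isDigit (cs : List Char) :
    ∀ c ∈ cs.takeWhile (fun c => !c.isDigit), ¬ c.isDigit := by
  intro c hc
  have := List.mem_takeWhile_imp hc
  simpa using this

theorem parse_eq_alt_of_not_D (cs : List Char)
    (hD : ¬ (2 ≤ cs.length ∧ (cs.take 2).all Char.isDigit = true)) :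
    (let (h, n, t) := parseGoA cs 0 cs [] [] []
     [String.ofList h, String.ofList n, String.ofList t]) =
    (let head := cs.takeWhile (fun c => !c.isDigit)
     if head.length = cs.length then ["", "", ""]
     else
       let rest := cs.drop head.length
       let run := (rest.takeWhile Char.isDigit).length
       let num := rest.take (min run 5)
       [String.ofList head, String.ofList num, String.ofList (rest.drop num.length)]) := by
  set p := cs.takeWhile (fun c => !c.isDigit) with hp
  have hsplit : p ++ cs.dropWhile (fun c => !c.isDigit) = cs := List.takeWhile_append_dropWhile
  have hskip := parseGoA_skip cs p 0 (cs.dropWhile (fun c => !c.isDigit))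
    (takeWhile_all_not_isDigit cs)
  rw [hsplit] at hskip
  match hr : cs.dropWhile (fun c => !c.isDigit) with
  | [] =>
    -- no digit in cs
    have hlen : p.length = cs.length := by
      have := congrArg List.length hsplit; simpa [hr] using this
    simp only [hskip, hr, parseGoA]
    simp [hlen]
    all_goals rfl
  | c :: rest =>
    have hcdig : c.isDigit := by
      have := List.head_dropWhile_not (p := fun c => !c.isDigit) (l := cs) (by simp [hr])
      simpa [hr] using this
    have hlenlt : p.length < cs.length := by
      have := congrArg List.length hsplit; simp [hr] at this; omega
    have hdropP : cs.drop p.length = c :: rest := by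
      have := congrArg (List.drop p.length) hsplit
      rw [List.drop_left] at this
      rw [← this]; exact hr
    have htakeP : cs.take p.length = p := by
      have := congrArg (List.take p.length) hsplit
      rw [List.take_left] at this
      exact this.symm
    have hstep : parseGoA cs p.length (c :: rest) [] [] [] =
        parseGoA cs (p.length + 1) rest p [c] [] := by
      rw [parseGoA]
      simp only [contains_digits_eq_isDigit, hcdig, if_true]
      rw [if_pos (by norm_num : ([] : List Char).length < 5)]
      rw [htakeP]
      simp only [List.nil_append]
    rw [hr] at hskip
    rw [hskip]
    simp only [Nat.zero_add]
    rw [hstep]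
    by_cases hpnil : p = []
    · -- first char of cs is a digit; outside D_, rest is empty or starts with a non-digit
      have hcs : cs = c :: rest := by rw [← hdropP, hpnil]; simp
      rw [hpnil]
      simp only [List.length_nil, Nat.zero_add]
      match hrest : rest with
      | [] =>
        rw [parseGoA]
        simp [hcs, hrest, List.takeWhile_cons, hcdig]
      | d :: r2 =>
        have hdnd : ¬ d.isDigit := by
          intro hdd
          exact hD (by constructor <;> simp [hcs, hrest, hcdig, hdd])
        rw [parseGoA]
        simp only [contains_digits_eq_isDigit, hdnd]
        rw [if_neg (by simp [hdnd]), if_pos (by simp)]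
        have hdr : cs.drop 1 = d :: r2 := by simp [hcs, hrest]
        rw [hdr]
        simp [hcs, hrest, List.takeWhile_cons, hcdig, hdnd]
    · -- head = p ≠ []: run the phase-2 lemma
      rw [parseGoA_run cs rest (p.length + 1) p [c] hpnil (by simp) (by simp)
        (by have := congrArg (List.drop 1) hdropP
            simpa [List.drop_drop, Nat.add_comm] using this)]
      rw [if_neg (by omega)]
      rw [hdropP]
      set ts := rest.takeWhile Char.isDigit with hts
      have hpref : ts ++ rest.dropWhile Char.isDigit = rest := List.takeWhile_append_dropWhile
      have htake : ∀ n, n ≤ ts.length → rest.take n = ts.take n := by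
        intro n hn
        conv_lhs => rw [← hpref]
        rw [List.take_append_of_le_length hn]
      simp only [List.takeWhile_cons, hcdig, if_true, List.length_cons]
      have hnum : (c :: rest).take (min (ts.length + 1) 5) = c :: ts.take 4 := by
        rw [List.take_cons (by omega)]
        have h2 : min (ts.length + 1) 5 - 1 = min ts.length 4 := by omega
        rw [h2, htake (min ts.length 4) (Nat.min_le_left _ _)]
        congr 1
        rcases Nat.le_total ts.length 4 with h4 | h4
        · rw [Nat.min_eq_left h4, List.take_of_length_le (le_refl _), List.take_of_length_le h4]
        · rw [Nat.min_eq_right h4]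
      rw [hnum]
      simp [List.length_take, Nat.min_comm]

-- ===== VERDICT (by name: the statement is the Claim_ definition above) =====
theorem parse_spec : Claim_unchanged_parse := by
  intro s _ hD
  have hD' : ¬ (2 ≤ s.toList.length ∧ (s.toList.take 2).all Char.isDigit = true) := by
    intro h; exact hD h
  unfold parse parse_alt
  exact parse_eq_alt_of_not_D s.toList hD'

theorem parse_changed : Claim_changed_parse := by unfold Claim_changed_parse; decide

theorem parse_tight : Claim_exact_parse := by
  intro s _ hD heq
  obtain ⟨hlen, hdig⟩ := hD
  match hcs : s.toList with
  | [] => rw [hcs] at hlen; simp at hlen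
  | [c] => rw [hcs] at hlen; simp at hlen
  | c :: d :: r =>
    rw [hcs] at hdig
    simp only [List.take, List.all_cons, Bool.and_eq_true] at hdig
    obtain ⟨hc, hd, -⟩ := hdig
    -- A's head is [c], B's head is []: the first list elements differ
    have hA : (parse s).head? = some (String.ofList [c]) := by
      unfold parse
      simp only [hcs]
      rw [parseGoA]
      simp only [contains_digits_eq_isDigit, hc]
      rw [if_pos (by simp [hc]), if_pos (by simp), if_pos (by simp)]
      rw [parseGoA]
      simp only [contains_digits_eq_isDigit, hd]
      rw [if_pos (by simp [hd]), if_pos (by simp)]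
      rw [if_pos (by simp)]
      rw [parseGoA_run (c :: d :: r) r (0 + 1 + 1) ((c :: d :: r).take (0 + 1))
        ([] ++ [c] ++ [d]) (by simp) (by simp) (by simp) (by simp)]
      simp
    have hB : (parse_alt s).head? = some "" := by
      unfold parse_alt
      simp only [hcs]
      have : (c :: d :: r).takeWhile (fun c => !c.isDigit) = [] := by
        simp [List.takeWhile_cons, hc]
      rw [this]
      simp only [List.length_nil]
      rw [if_neg (by simp)]
      simp
    rw [heq, hB] at hA
    have hker := Option.some.inj hA
    have hchars := congrArg String.toList hker
    rw [String.toList_empty, String.toList_ofList] at hchars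
    simp at hchars
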